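-- pv_equiv track=rewrite | github.com/kmaag/Temporal-Uncertainty-Estimates | helper.py | name_to_latex_scatter_plot
-- ===== SOURCE A (Python) =====
-- def name_to_latex_scatter_plot( name ):
--   """
--   metric names in latex for scatter plots
--   """
--
--   for i in range(100):
--     if name == "cprob"+str(i):
--       return "$C_{"+str(i)+"}$"
--
--   mapping = {'E': '$\\bar E$',
--              'E_bd': '${\\bar E}_{bd}$',
--              'E_in': '${\\bar E}_{in}$',
--              'E_rel_in': '$\\tilde{\\bar E}_{in}/\\tilde{\\bar E}_{in,max}$',
--              'E_rel': '$\\tilde{\\bar E}/\\tilde{\\bar E}_{max}$',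
--              'M': '$\\bar M$',
--              'M_bd': '${\\bar M}_{bd}$',
--              'M_in': '${\\bar M}_{in}$',
--              'M_rel_in': '$\\tilde{\\bar M}_{in}/\\tilde{\\bar M}_{in,max}$',
--              'M_rel': '$\\tilde{\\bar M}/\\tilde{\\bar M}_{max}$',
--              'V': '$\\bar V$',
--              'V_bd': '${\\bar V}_{bd}$',
--              'V_in': '${\\bar V}_{in}$',
--              'V_rel_in': '$\\tilde{\\bar V}_{in}/\\tilde{\\bar V}_{in,max}$',
--              'V_rel': '$\\tilde{\\bar V}/\\tilde{\\bar V}_{max}$',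
--              'S': '$S/S_{max}$',
--              'S_bd': '$S_{bd}/S_{bd,max}$',
--              'S_in': '$S_{in}/S_{in,max}$',
--              'S_rel_in': '$\\tilde{S}_{in}/\\tilde{S}_{in,max}$',
--              'S_rel': '$\\tilde{S}/\\tilde{S}_{max}$',
--              'mean_x' : '${\\bar k}_{v}$',
--              'mean_y' : '${\\bar k}_{h}$',
--              'C_p' : '${C}_{p}$',
--              'iou' : '$IoU$',
--              'score' : '$s$',
--              'survival' : '$v$',
--              'ratio' : '$r$',
--              'deformation' : '$f$',
--              'diff_mean' : '$d_{c}$',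
--              'diff_size' : '$d_{s}$'}
--   if str(name) in mapping:
--     return mapping[str(name)]
--   else:
--     return str(name)
-- ===== SOURCE B (Python) =====
-- def _valid_suffix(suf):
--     # canonical decimal form of some i in range(100): "0".."9" or "10".."99"
--     return (len(suf) == 1 and suf.isdigit()) or \
--            (len(suf) == 2 and suf[0] != '0' and suf.isdigit())
--
--
-- def name_to_latex_scatter_plot(name):
--     """
--     metric names in latex for scatter plots
--     """
--     if isinstance(name, str) and name.startswith("cprob"):
--         suf = name[5:]
--         if _valid_suffix(suf):
--             return "$C_{" + suf + "}$"
--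
--     mapping = {'E': '$\\bar E$',
--                'E_bd': '${\\bar E}_{bd}$',
--                'E_in': '${\\bar E}_{in}$',
--                'E_rel_in': '$\\tilde{\\bar E}_{in}/\\tilde{\\bar E}_{in,max}$',
--                'E_rel': '$\\tilde{\\bar E}/\\tilde{\\bar E}_{max}$',
--                'M': '$\\bar M$',
--                'M_bd': '${\\bar M}_{bd}$',
--                'M_in': '${\\bar M}_{in}$',
--                'M_rel_in': '$\\tilde{\\bar M}_{in}/\\tilde{\\bar M}_{in,max}$',
--                'M_rel': '$\\tilde{\\bar M}/\\tilde{\\bar M}_{max}$',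
--                'V': '$\\bar V$',
--                'V_bd': '${\\bar V}_{bd}$',
--                'V_in': '${\\bar V}_{in}$',
--                'V_rel_in': '$\\tilde{\\bar V}_{in}/\\tilde{\\bar V}_{in,max}$',
--                'V_rel': '$\\tilde{\\bar V}/\\tilde{\\bar V}_{max}$',
--                'S': '$S/S_{max}$',
--                'S_bd': '$S_{bd}/S_{bd,max}$',
--                'S_in': '$S_{in}/S_{in,max}$',
--                'S_rel_in': '$\\tilde{S}_{in}/\\tilde{S}_{in,max}$',
--                'S_rel': '$\\tilde{S}/\\tilde{S}_{max}$',
--                'mean_x': '${\\bar k}_{v}$',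
--                'mean_y': '${\\bar k}_{h}$',
--                'C_p': '${C}_{p}$',
--                'iou': '$IoU$',
--                'score': '$s$',
--                'survival': '$v$',
--                'ratio': '$r$',
--                'deformation': '$f$',
--                'diff_mean': '$d_{c}$',
--                'diff_size': '$d_{s}$'}
--     return mapping.get(str(name), str(name))
-- ===== Notes on version B (the rewrite author's own statement) =====
-- stated objective: simpler
-- what changed: Replaces the 100-iteration equality scan over candidate prefixed names by a direct parse: strip the five-character prefix and accept the remaining suffix only if it is the canonical decimal form of an integer below 100 (one digit, or two digits with a nonzero leading digit); the dict fallback uses dict.get instead of an in-test plus indexing.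
import Mathlib
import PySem

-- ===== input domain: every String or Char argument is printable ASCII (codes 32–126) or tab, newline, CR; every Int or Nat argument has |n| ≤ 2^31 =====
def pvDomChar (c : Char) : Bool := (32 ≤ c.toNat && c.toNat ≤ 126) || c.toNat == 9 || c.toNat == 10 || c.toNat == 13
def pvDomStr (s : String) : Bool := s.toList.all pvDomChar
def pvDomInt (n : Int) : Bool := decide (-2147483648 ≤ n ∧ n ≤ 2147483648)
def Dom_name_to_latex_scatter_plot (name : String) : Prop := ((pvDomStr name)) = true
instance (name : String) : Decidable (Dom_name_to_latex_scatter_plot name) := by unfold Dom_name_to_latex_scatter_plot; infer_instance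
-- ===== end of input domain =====

-- B replaces A's 100-iteration equality scan over "cprob0".."cprob99" by a direct parse of the
-- suffix after "cprob" (objective: simpler).

-- the mapping dict (identical constant table in A and B)
def pvMapping : PySem.Dict String String := PySem.Dict.ofList
  [("E", "$\\bar E$"),
   ("E_bd", "${\\bar E}_{bd}$"),
   ("E_in", "${\\bar E}_{in}$"),
   ("E_rel_in", "$\\tilde{\\bar E}_{in}/\\tilde{\\bar E}_{in,max}$"),
   ("E_rel", "$\\tilde{\\bar E}/\\tilde{\\bar E}_{max}$"),
   ("M", "$\\bar M$"),
   ("M_bd", "${\\bar M}_{bd}$"),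
   ("M_in", "${\\bar M}_{in}$"),
   ("M_rel_in", "$\\tilde{\\bar M}_{in}/\\tilde{\\bar M}_{in,max}$"),
   ("M_rel", "$\\tilde{\\bar M}/\\tilde{\\bar M}_{max}$"),
   ("V", "$\\bar V$"),
   ("V_bd", "${\\bar V}_{bd}$"),
   ("V_in", "${\\bar V}_{in}$"),
   ("V_rel_in", "$\\tilde{\\bar V}_{in}/\\tilde{\\bar V}_{in,max}$"),
   ("V_rel", "$\\tilde{\\bar V}/\\tilde{\\bar V}_{max}$"),
   ("S", "$S/S_{max}$"),
   ("S_bd", "$S_{bd}/S_{bd,max}$"),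
   ("S_in", "$S_{in}/S_{in,max}$"),
   ("S_rel_in", "$\\tilde{S}_{in}/\\tilde{S}_{in,max}$"),
   ("S_rel", "$\\tilde{S}/\\tilde{S}_{max}$"),
   ("mean_x", "${\\bar k}_{v}$"),
   ("mean_y", "${\\bar k}_{h}$"),
   ("C_p", "${C}_{p}$"),
   ("iou", "$IoU$"),
   ("score", "$s$"),
   ("survival", "$v$"),
   ("ratio", "$r$"),
   ("deformation", "$f$"),
   ("diff_mean", "$d_{c}$"),
   ("diff_size", "$d_{s}$")]

-- ===== PORT A =====
-- the `for i in range(100): if name == "cprob"+str(i): return …` loop, with early return as Option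
def pvScanA : List Int → List Char → Option (List Char)
  | [], _ => none
  | i :: rest, s =>
      if s = "cprob".toList ++ PySem.Int.toChars i then
        some ("$C_{".toList ++ PySem.Int.toChars i ++ "}$".toList)
      else pvScanA rest s

def name_to_latex_scatter_plot (name : String) : String :=
  match pvScanA (PySem.List.pyRange 0 100 1) name.toList with
  | some r => String.ofList r
  | none =>
      -- `if str(name) in mapping: return mapping[str(name)] else: return str(name)` (str(name) = name on a str)
      match pvMapping.get? name with
      | some v => v
      | none => name

-- ===== PORT B =====
-- Source B's _valid_suffix: canonical decimal form of some i in range(100)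
def pvValidSuffix (suf : List Char) : Bool :=
  (suf.length == 1 && PySem.Chars.strIsdigit suf) ||
  (suf.length == 2 && !(PySem.List.pyGetD suf 0 ' ' == '0') && PySem.Chars.strIsdigit suf)

def name_to_latex_scatter_plot_alt (name : String) : String :=
  -- Source B's isinstance(name, str) guard is statically true for a String argument
  if PySem.Chars.startswith name.toList "cprob".toList then
    let suf := PySem.Chars.slice name.toList (some 5) none   -- name[5:]
    if pvValidSuffix suf then
      String.ofList ("$C_{".toList ++ suf ++ "}$".toList)
    else (pvMapping.get? name).getD name                     -- mapping.get(str(name), str(name))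
  else (pvMapping.get? name).getD name

-- ===== PRECONDITION & SPEC =====
def Spec_name_to_latex_scatter_plot (name : String) (out : String) : Prop := out = name_to_latex_scatter_plot_alt name
instance (name : String) (out : String) : Decidable (Spec_name_to_latex_scatter_plot name out) := by unfold Spec_name_to_latex_scatter_plot; infer_instance

-- ===== CLAIM (what is proved, stated in full; the proofs are below) =====
def Claim_equal_name_to_latex_scatter_plot : Prop := ∀ (name : String), Dom_name_to_latex_scatter_plot name → Spec_name_to_latex_scatter_plot name (name_to_latex_scatter_plot name)

-- ===== LEMMAS AND PROOFS =====
def pvDigits : List Char := ['0','1','2','3','4','5','6','7','8','9']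

lemma pvScanA_none (l : List Int) (s : List Char)
    (h : ∀ i ∈ l, s ≠ "cprob".toList ++ PySem.Int.toChars i) : pvScanA l s = none := by
  induction l with
  | nil => rfl
  | cons i rest ih =>
      simp only [pvScanA]
      rw [if_neg (h i (List.mem_cons_self))]
      exact ih (fun j hj => h j (List.mem_cons_of_mem _ hj))

lemma pvScanA_found (l : List Int) (s : List Char)
    (h : ∃ i ∈ l, s = "cprob".toList ++ PySem.Int.toChars i) :
    pvScanA l s = some ("$C_{".toList ++ s.drop 5 ++ "}$".toList) := by
  induction l with
  | nil => simp at h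
  | cons i rest ih =>
      simp only [pvScanA]
      by_cases hi : s = "cprob".toList ++ PySem.Int.toChars i
      · rw [if_pos hi]
        have : s.drop 5 = PySem.Int.toChars i := by
          rw [hi, show (5 : Nat) = ("cprob".toList).length from rfl, List.drop_left]
        rw [this]
      · rw [if_neg hi]
        apply ih
        rcases h with ⟨j, hj, hsj⟩
        rcases List.mem_cons.1 hj with rfl | hj'
        · exact absurd hsj hi
        · exact ⟨j, hj', hsj⟩

lemma pv_mem_digits (c : Char) (h : PySem.Chars.isdigit c = true) : c ∈ pvDigits := by
  simp [PySem.Chars.isdigit, Char.le_def] at h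
  obtain ⟨h1, h2⟩ := h
  have hc : c = Char.ofNat c.toNat := by simp [Char.ofNat_toNat]
  have h1n : 48 ≤ c.toNat := h1
  have h2n : c.toNat ≤ 57 := h2
  rw [hc]
  interval_cases h : c.toNat <;> decide

lemma pv_digit_toChars : ∀ k : Nat, k < 10 →
    PySem.Int.toChars (k : Int) = [pvDigits[k]?.getD ' '] := by decide

lemma pv_two_toChars : ∀ k1 : Nat, k1 < 10 → ∀ k2 : Nat, k2 < 10 → 1 ≤ k1 →
    PySem.Int.toChars ((10 * k1 + k2 : Nat) : Int) =
      [pvDigits[k1]?.getD ' ', pvDigits[k2]?.getD ' '] := by decide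

set_option maxRecDepth 2000 in
lemma pv_valid_toChars : ∀ n : Nat, n < 100 →
    pvValidSuffix (PySem.Int.toChars (n : Int)) = true := by decide

lemma pv_exists_of_valid (t : List Char) (hv : pvValidSuffix t = true) :
    ∃ i : Int, (0 ≤ i ∧ i < 100) ∧ t = PySem.Int.toChars i := by
  match t with
  | [] => simp [pvValidSuffix] at hv
  | [c] =>
      have hd : PySem.Chars.isdigit c = true := by
        simp [pvValidSuffix, PySem.Chars.strIsdigit] at hv; exact hv
      obtain ⟨k, hk⟩ := List.mem_iff_getElem?.1 (pv_mem_digits c hd)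
      have hklt : k < 10 := by
        by_contra hge
        rw [List.getElem?_eq_none (by simpa [pvDigits] using Nat.le_of_not_lt hge)] at hk
        simp at hk
      refine ⟨(k : Int), ⟨by positivity, by exact_mod_cast hklt.trans (by norm_num)⟩, ?_⟩
      rw [pv_digit_toChars k hklt, hk]; rfl
  | [c1, c2] =>
      simp [pvValidSuffix, PySem.Chars.strIsdigit, PySem.List.pyGetD] at hv
      obtain ⟨hne', hd1, hd2⟩ := hv
      have hne : (c1 == '0') = false := beq_eq_false_iff_ne.2 hne'
      obtain ⟨k1, hk1⟩ := List.mem_iff_getElem?.1 (pv_mem_digits c1 hd1)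
      obtain ⟨k2, hk2⟩ := List.mem_iff_getElem?.1 (pv_mem_digits c2 hd2)
      have hk1lt : k1 < 10 := by
        by_contra hge
        rw [List.getElem?_eq_none (by simpa [pvDigits] using Nat.le_of_not_lt hge)] at hk1
        simp at hk1
      have hk2lt : k2 < 10 := by
        by_contra hge
        rw [List.getElem?_eq_none (by simpa [pvDigits] using Nat.le_of_not_lt hge)] at hk2
        simp at hk2
      have hk1pos : 1 ≤ k1 := by
        rcases Nat.eq_zero_or_pos k1 with rfl | h
        · exfalso
          have : c1 = '0' := by
            have : pvDigits[0]? = some '0' := rfl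
            rw [this] at hk1; exact (Option.some.inj hk1).symm
          rw [this] at hne; simp at hne
        · exact h
      refine ⟨((10 * k1 + k2 : Nat) : Int), ⟨by positivity, by exact_mod_cast (by omega : 10 * k1 + k2 < 100)⟩, ?_⟩
      rw [pv_two_toChars k1 hk1lt k2 hk2lt hk1pos, hk1, hk2]; rfl
  | c1 :: c2 :: c3 :: rest => simp [pvValidSuffix] at hv

lemma pv_main (name : String) :
    name_to_latex_scatter_plot name = name_to_latex_scatter_plot_alt name := by
  unfold name_to_latex_scatter_plot name_to_latex_scatter_plot_alt
  by_cases hp : PySem.Chars.startswith name.toList "cprob".toList = true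
  · obtain ⟨u, hu⟩ := (PySem.Chars.startswith_iff _ _).1 hp
    have hdrop : name.toList.drop 5 = u := by
      rw [← hu, show (5 : Nat) = ("cprob".toList).length from rfl, List.drop_left]
    have hslice : PySem.Chars.slice name.toList (some 5) none = u := by
      rw [PySem.Chars.slice_eq_listSlice, PySem.List.slice_from _ (by norm_num : (0:Int) ≤ 5)]
      simpa using hdrop
    by_cases hv : pvValidSuffix u = true
    · obtain ⟨i, ⟨h0, h100⟩, hti⟩ := pv_exists_of_valid u hv
      have hfound := pvScanA_found (PySem.List.pyRange 0 100 1) name.toList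
        ⟨i, (PySem.List.mem_pyRange_one).2 ⟨h0, h100⟩, by rw [← hu, hti]⟩
      rw [hfound, hp, hslice]
      simp [hv, hdrop]
    · have hnone : pvScanA (PySem.List.pyRange 0 100 1) name.toList = none := by
        apply pvScanA_none
        intro i hi heq
        rw [PySem.List.mem_pyRange_one] at hi
        have hui : u = PySem.Int.toChars i := by
          rw [← hu] at heq
          exact List.append_cancel_left heq
        apply hv
        rw [hui, ← Int.toNat_of_nonneg hi.1]
        exact pv_valid_toChars i.toNat (by omega)
      rw [hnone, hp, hslice]
      simp [hv]
      cases pvMapping.get? name <;> simp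
  · have hnone : pvScanA (PySem.List.pyRange 0 100 1) name.toList = none := by
      apply pvScanA_none
      intro i _ heq
      exact hp ((PySem.Chars.startswith_iff _ _).2 ⟨_, heq.symm⟩)
    rw [hnone, Bool.not_eq_true] at *
    rw [hp]
    simp
    cases pvMapping.get? name <;> simp

-- ===== VERDICT (by name: the statement is the Claim_ definition above) =====
theorem name_to_latex_scatter_plot_spec : Claim_equal_name_to_latex_scatter_plot := by
  intro name _
  unfold Spec_name_to_latex_scatter_plot
  exact pv_main name
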